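-- pv_equiv track=rewrite | github.com/Genentech/beignet | src/beignet/_polynomial/__trim_sequence.py | _trim_sequence
-- ===== SOURCE A (Python) =====
-- def _trim_sequence(x):
--     if len(x) == 0 or x[-1] != 0:
--         output = x
--     else:
--         for index in range(len(x) - 1, -1, -1):
--             if x[index] != 0:
--                 break
--
--         output = x[: index + 1]
--
--     return output
-- ===== SOURCE B (Python) =====
-- def _trim_sequence(x):
--     last = 0
--     for i, v in enumerate(x):
--         if v != 0:
--             last = i
--     return x[: last + 1]
-- ===== Notes on version B (the rewrite author's own statement) =====
-- stated objective: simpler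
-- what changed: Replaces A's guard plus backward early-terminating scan-and-slice with a single guardless forward pass over enumerate(x) that tracks the last nonzero index and slices once; the empty and all-zero cases fall out of the same loop instead of special branches.
import Mathlib
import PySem

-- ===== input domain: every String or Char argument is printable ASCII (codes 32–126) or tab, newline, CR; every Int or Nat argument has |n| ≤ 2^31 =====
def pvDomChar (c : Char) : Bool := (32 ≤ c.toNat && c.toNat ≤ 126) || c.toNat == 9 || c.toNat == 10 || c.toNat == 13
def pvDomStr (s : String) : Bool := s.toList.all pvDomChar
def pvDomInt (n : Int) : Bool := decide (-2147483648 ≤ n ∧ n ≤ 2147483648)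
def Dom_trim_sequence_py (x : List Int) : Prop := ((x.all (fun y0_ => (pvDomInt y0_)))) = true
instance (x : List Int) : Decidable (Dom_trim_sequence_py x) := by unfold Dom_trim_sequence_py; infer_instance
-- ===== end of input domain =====

-- B replaces A's guard + backward early-exit scan by a guardless forward scan tracking the
-- last nonzero index (objective: simpler; same O(n) cost).

-- ===== PORT A =====
-- A's backward for-loop with break: walks the countdown index list, returning the first
-- index whose element is nonzero, else the last loop value (the accumulator).
-- x[index] is ported as pyGetD x i 0: every index produced by the range is in bounds, so this is exact.
def pvGoA (x : List Int) : List Int → Int → Int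
  | [], last => last
  | i :: rest, _ => if PySem.List.pyGetD x i 0 ≠ 0 then i else pvGoA x rest i

def trim_sequence_py (x : List Int) : List Int :=
  if x.length = 0 ∨ PySem.List.pyGetD x (-1) 0 ≠ 0 then x
  else PySem.List.slice x none
    (some (pvGoA x (PySem.List.pyRange ((x.length : Int) - 1) (-1) (-1)) 0 + 1))

-- ===== PORT B =====
def trim_sequence_py_alt (x : List Int) : List Int :=
  PySem.List.slice x none
    (some ((PySem.List.enumerate x 0).foldl
      (fun last p => if p.2 ≠ 0 then p.1 else last) 0 + 1))

-- ===== PRECONDITION & SPEC =====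
def Spec_trim_sequence_py (x : List Int) (out : List Int) : Prop := out = trim_sequence_py_alt x
instance (x : List Int) (out : List Int) : Decidable (Spec_trim_sequence_py x out) := by unfold Spec_trim_sequence_py; infer_instance

-- ===== CLAIM (what is proved, stated in full; the proofs are below) =====
def Claim_equal_trim_sequence_py : Prop := ∀ (x : List Int), Dom_trim_sequence_py x → Spec_trim_sequence_py x (trim_sequence_py x)

-- ===== LEMMAS AND PROOFS =====

-- pvGoA only reads x through pyGetD at the listed indices
theorem pvGoA_congr (x y : List Int) (idxs : List Int) (l : Int)
    (h : ∀ i ∈ idxs, PySem.List.pyGetD x i 0 = PySem.List.pyGetD y i 0) :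
    pvGoA x idxs l = pvGoA y idxs l := by
  induction idxs generalizing l with
  | nil => rfl
  | cons i rest ih =>
    have hi := h i (by simp)
    simp only [pvGoA, hi]
    split
    · rfl
    · exact ih _ (fun j hj => h j (by simp [hj]))

-- the accumulator is only returned on the empty index list
theorem pvGoA_acc (x : List Int) (idxs : List Int) (h : idxs ≠ []) (l l' : Int) :
    pvGoA x idxs l = pvGoA x idxs l' := by
  cases idxs with
  | nil => exact absurd rfl h
  | cons i rest => simp [pvGoA]

-- shorthand for B's fold
def pvLastB (x : List Int) : Int :=
  (PySem.List.enumerate x 0).foldl (fun last p => if p.2 ≠ 0 then p.1 else last) 0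

theorem pvLastB_append (xs : List Int) (a : Int) :
    pvLastB (xs ++ [a]) = if a ≠ 0 then (xs.length : Int) else pvLastB xs := by
  simp [pvLastB, PySem.List.enumerate_append, List.foldl_append, PySem.List.enumerate_cons,
    PySem.List.enumerate_nil, List.foldl]

-- the two loops compute the same index
theorem pvGoA_eq_pvLastB (x : List Int) :
    pvGoA x (PySem.List.pyRange ((x.length : Int) - 1) (-1) (-1)) 0 = pvLastB x := by
  induction x using List.reverseRecOn with
  | nil =>
    rw [PySem.List.pyRange_neg_one_eq_nil (by simp)]
    simp [pvGoA, pvLastB, PySem.List.enumerate_nil]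
  | append_singleton xs a ih =>
    have hn : ((xs ++ [a]).length : Int) - 1 = (xs.length : Int) := by simp
    rw [hn, PySem.List.pyRange_neg_one_cons (by omega)]
    rw [pvLastB_append]
    simp only [pvGoA, PySem.List.pyGetD_natCast]
    have hget : (xs ++ [a]).getD xs.length 0 = a := by
      simp [List.getD]
    rw [hget]
    split
    · rfl
    · -- a = 0 : continue on indices below xs.length
      have hcongr : pvGoA (xs ++ [a]) (PySem.List.pyRange ((xs.length : Int) - 1) (-1) (-1)) (xs.length : Int)
          = pvGoA xs (PySem.List.pyRange ((xs.length : Int) - 1) (-1) (-1)) (xs.length : Int) := by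
        apply pvGoA_congr
        intro i hi
        rw [PySem.List.mem_pyRange_neg_one] at hi
        obtain ⟨h1, h2⟩ := hi
        have h0 : 0 ≤ i := by omega
        have hlt : i < (xs.length : Int) := by omega
        have hk : i = ((i.toNat : Nat) : Int) := by omega
        rw [hk, PySem.List.pyGetD_natCast, PySem.List.pyGetD_natCast]
        have hklt : i.toNat < xs.length := by omega
        simp [List.getD, List.getElem?_append_left hklt]
      rw [hcongr]
      cases xs with
      | nil =>
        rw [PySem.List.pyRange_neg_one_eq_nil (by simp)] at ih ⊢
        simpa [pvGoA] using ih
      | cons b bs =>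
        rw [pvGoA_acc _ _ (by
          rw [PySem.List.pyRange_neg_one_cons (by
            have : (0:Int) ≤ ((b :: bs).length : Int) - 1 := by simp
            omega)]
          simp) _ 0]
        exact ih

theorem pvLastB_getLast_ne (xs : List Int) (a : Int) (ha : a ≠ 0) :
    pvLastB (xs ++ [a]) = (xs.length : Int) := by
  rw [pvLastB_append]; simp [ha]

-- ===== VERDICT (by name: the statement is the Claim_ definition above) =====
theorem trim_sequence_py_spec : Claim_equal_trim_sequence_py := by
  intro x _
  unfold Spec_trim_sequence_py trim_sequence_py trim_sequence_py_alt
  split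
  · rename_i hguard
    rcases hguard with hlen | hlast
    · -- empty list
      have hx : x = [] := List.length_eq_zero_iff.mp hlen
      subst hx
      simp [PySem.List.slice, PySem.List.enumerate_nil]
    · -- last element nonzero: B's fold lands on length-1, slice gives back x
      rcases List.eq_nil_or_concat x with hx | ⟨xs, a, hx⟩
      · subst hx; exact absurd (by decide) hlast
      · subst hx
        simp only [List.concat_eq_append] at hlast ⊢
        rw [PySem.List.pyGetD_neg_one_append_singleton] at hlast
        have hfold : (PySem.List.enumerate (xs ++ [a]) 0).foldl
            (fun last p => if p.2 ≠ 0 then p.1 else last) 0 = (xs.length : Int) :=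
          pvLastB_getLast_ne xs a hlast
        rw [hfold]
        have : (xs.length : Int) + 1 = (((xs ++ [a]).length : Nat) : Int) := by simp
        rw [this, PySem.List.slice_to_natCast]
        simp
  · rw [pvGoA_eq_pvLastB]
    rfl
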